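-- pv_equiv track=rewrite | github.com/ArtsiomKlimkovich/technikum-19 | 2E/python/sprawdziany/przeliczania-binarne/zadania z matury/matura czerwiec 2023/matura zadania.py | prawieZrownoWazona
-- ===== SOURCE A (Python) =====
-- def prawieZrownoWazona(n):
--     iloscZer = 0
--     iloscJedynek = 0
--     for i in n:
--         if i == "0":
--             iloscZer += 1
--         else:
--             iloscJedynek += 1
--     return iloscZer + 1 == iloscJedynek
-- ===== SOURCE B (Python) =====
-- def prawieZrownoWazona(n):
--     # Divide-and-conquer signed balance: '0' contributes -1, any other char +1;
--     # ones == zeros + 1 exactly when the total balance is 1.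
--     def bal(s):
--         if len(s) == 0:
--             return 0
--         if len(s) == 1:
--             return -1 if s == "0" else 1
--         m = len(s) // 2
--         return bal(s[:m]) + bal(s[m:])
--     return bal(n) == 1
-- ===== Notes on version B (the rewrite author's own statement) =====
-- stated objective: alternative
-- what changed: Replaces the dual-accumulator linear loop with a recursive divide-and-conquer helper computing a single signed balance (-1 per '0', +1 otherwise) over string halves, returning bal(n) == 1.
import Mathlib
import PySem

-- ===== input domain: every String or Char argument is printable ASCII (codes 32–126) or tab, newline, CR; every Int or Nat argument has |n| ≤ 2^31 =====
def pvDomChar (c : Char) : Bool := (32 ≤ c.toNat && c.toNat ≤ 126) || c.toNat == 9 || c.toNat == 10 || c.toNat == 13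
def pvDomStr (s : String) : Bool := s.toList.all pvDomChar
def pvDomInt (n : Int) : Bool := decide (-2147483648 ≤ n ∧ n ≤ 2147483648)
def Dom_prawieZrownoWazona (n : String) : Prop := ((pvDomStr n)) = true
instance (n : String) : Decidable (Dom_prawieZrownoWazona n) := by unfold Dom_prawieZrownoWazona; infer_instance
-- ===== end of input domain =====

-- B replaces A's dual-accumulator loop with a recursive divide-and-conquer signed balance (-1 per '0', +1 otherwise) checked against 1 (objective: alternative).


-- ===== PORT A =====
def prawieZrownoWazona (n : String) : Bool :=
  let p := n.toList.foldl
    (fun (acc : Int × Int) i => if i == '0' then (acc.1 + 1, acc.2) else (acc.1, acc.2 + 1))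
    (0, 0)
  p.1 + 1 == p.2

-- ===== PORT B =====
-- bal: s[:m] / s[m:] with 0 ≤ m ≤ len are exactly take/drop (PySem.List.slice_to_natCast / slice_from_natCast).
def pvBal (l : List Char) : Int :=
  if l.length = 0 then 0
  else if l.length = 1 then (if l == ['0'] then -1 else 1)
  else
    pvBal (l.take (l.length / 2)) + pvBal (l.drop (l.length / 2))
termination_by l.length
decreasing_by
  · simp [List.length_take]; omega
  · simp [List.length_drop]; omega

def prawieZrownoWazona_alt (n : String) : Bool := pvBal n.toList == 1

-- ===== PRECONDITION & SPEC =====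
def Spec_prawieZrownoWazona (n : String) (out : Bool) : Prop := out = prawieZrownoWazona_alt n
instance (n : String) (out : Bool) : Decidable (Spec_prawieZrownoWazona n out) := by unfold Spec_prawieZrownoWazona; infer_instance

-- ===== CLAIM (what is proved, stated in full; the proofs are below) =====
def Claim_equal_prawieZrownoWazona : Prop := ∀ (n : String), Dom_prawieZrownoWazona n → Spec_prawieZrownoWazona n (prawieZrownoWazona n)

-- ===== LEMMAS AND PROOFS =====

-- The divide-and-conquer balance equals length minus twice the zero-count.
theorem pvBal_eq (l : List Char) : pvBal l = (l.length : Int) - 2 * l.count '0' := by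
  induction l using pvBal.induct with
  | case1 l h => rw [pvBal]; simp_all
  | case2 l h0 h1 heq =>
    rw [pvBal, if_neg h0, if_pos h1, if_pos heq]
    simp_all
  | case3 l h0 h1 hne =>
    obtain ⟨c, hc⟩ := List.length_eq_one_iff.mp h1
    subst hc
    rw [pvBal, if_neg h0, if_pos h1, if_neg hne]
    have : c ≠ '0' := by simpa using hne
    simp [this]
  | case4 l h0 h1 iht ihd =>
    rw [pvBal, if_neg h0, if_neg h1, iht, ihd]
    have hsplit : (l.take (l.length / 2)).count '0' + (l.drop (l.length / 2)).count '0' = l.count '0' := by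
      rw [← List.count_append, List.take_append_drop]
    have hlen : (l.take (l.length / 2)).length + (l.drop (l.length / 2)).length = l.length := by
      simp [List.length_take, List.length_drop]; omega
    omega

-- A's fold computes (zeros, non-zeros) as Int counters.
theorem pvFold_eq (l : List Char) : ∀ (z o : Int),
    l.foldl (fun (acc : Int × Int) i => if i == '0' then (acc.1 + 1, acc.2) else (acc.1, acc.2 + 1)) (z, o)
      = (z + l.count '0', o + ((l.length : Int) - l.count '0')) := by
  induction l with
  | nil => intro z o; simp
  | cons c t ih =>
    intro z o
    by_cases hc : c = '0'
    · subst hc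
      rw [List.foldl_cons, if_pos (by decide), ih, List.count_cons_self]
      simp only [Prod.mk.injEq, List.length_cons]
      constructor <;> (push_cast; ring)
    · rw [List.foldl_cons, if_neg (by simp [hc]), ih]
      simp only [List.count_cons, List.length_cons, Prod.mk.injEq, beq_iff_eq, hc,
        if_false, Nat.add_zero, true_and]
      push_cast; ring

-- ===== VERDICT (by name: the statement is the Claim_ definition above) =====
theorem prawieZrownoWazona_spec : Claim_equal_prawieZrownoWazona := by
  intro n _
  unfold Spec_prawieZrownoWazona prawieZrownoWazona prawieZrownoWazona_alt
  simp only [pvFold_eq, pvBal_eq]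
  have hle : n.toList.count '0' ≤ n.toList.length := List.count_le_length
  rcases Bool.eq_false_or_eq_true (0 + (n.toList.count '0' : Int) + 1 == 0 + ((n.toList.length : Int) - n.toList.count '0')) with h | h <;>
    rw [h] <;> simp_all <;> omega
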